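-- pv_equiv track=rewrite | github.com/ApproximateCaesar/AdventOfCode2022 | day15_beacon_exclusion_zone/day15_beacon_exclusion_zone_part1.py | segment_union_length
-- ===== SOURCE A (Python) =====
-- def segment_union_length(segments):
--     """Returns the length of the union of line segments using Klee's algorithm.
--     Code from https://iq.opengenus.org/klee-algorithm/"""
--     n = len(segments)
--
--     # Initialising list to store the points
--     points = [None] * (n * 2)
--
--     # Store points in a list and mark endpoints as true
--     for i in range(n):
--         points[i * 2] = (segments[i][0], False)
--         points[i * 2 + 1] = (segments[i][1], True)
--
--     # sort the points in ascending order
--     points = sorted(points, key=lambda x: x[0])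
--
--     total_length = 0  # total length of the union of segments
--     num_open_startpoints = 0  # The number of open (excess) startpoints
--
--     # Traversing through the points
--     for i in range(0, n * 2):
--
--         # Adding length from previous to current point
--         if (i > 0) & (points[i][0] > points[i - 1][0]) & (num_open_startpoints > 0):
--             total_length += (points[i][0] - points[i - 1][0])
--
--         # If this is an endpoint decrement counter by 1
--         if points[i][1]:
--             num_open_startpoints -= 1
--         # If this is a startpoint increment counter by 1
--         else:
--             num_open_startpoints += 1
--     return total_length
-- ===== SOURCE B (Python) =====
-- def segment_union_length(segments):
--     """Length of the union of line segments (signed Klee semantics).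
--
--     No event sweep or running counter: collect the sorted distinct coordinates,
--     and for each gap between adjacent coordinates decide independently whether it
--     is covered, by directly counting segment starts <= lo versus ends <= lo."""
--     coords = sorted({c for seg in segments for c in seg})
--     total = 0
--     for lo, hi in zip(coords, coords[1:]):
--         starts = sum(1 for s, e in segments if s <= lo)
--         ends = sum(1 for s, e in segments if e <= lo)
--         if starts > ends:
--             total += hi - lo
--     return total
-- ===== Notes on version B (the rewrite author's own statement) =====
-- stated objective: alternative
-- what changed: A sorts all 2n endpoint events and sweeps them with a running open-startpoint counter; B has no event list and no running counter: it takes the sorted distinct coordinates and for each gap between adjacent coordinates decides coverage independently by recounting starts<=lo versus ends<=lo over the segments, trading the O(n log n) sweep for an O(n^2) stateless per-gap test.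
import Mathlib
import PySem

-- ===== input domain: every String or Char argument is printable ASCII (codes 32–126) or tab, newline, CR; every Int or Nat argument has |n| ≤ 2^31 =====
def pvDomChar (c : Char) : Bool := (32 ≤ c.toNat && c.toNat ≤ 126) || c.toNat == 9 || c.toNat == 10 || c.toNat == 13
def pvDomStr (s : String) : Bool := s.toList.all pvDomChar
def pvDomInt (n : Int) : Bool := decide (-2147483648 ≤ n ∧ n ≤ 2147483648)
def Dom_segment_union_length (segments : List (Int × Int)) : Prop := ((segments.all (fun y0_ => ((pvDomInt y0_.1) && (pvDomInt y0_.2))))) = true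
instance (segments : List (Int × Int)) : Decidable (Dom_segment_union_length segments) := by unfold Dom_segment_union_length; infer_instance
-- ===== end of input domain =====

-- B replaces A's event sweep with a running counter by a stateless per-gap test: for each
-- gap between adjacent distinct coordinates it recounts starts<=lo versus ends<=lo directly
-- (alternative decomposition, O(n^2) instead of A's O(n log n)).

-- ===== PORT A =====
-- points[2i]=(start,False), points[2i+1]=(end,True): the positional fill is exactly flatMap
def segment_union_length (segments : List (Int × Int)) : Int :=
  let n : Int := segments.length
  let pts := PySem.List.sorted (segments.flatMap (fun s => [(s.1, false), (s.2, true)])) (fun p => p.1) false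
  -- for i in range(0, n*2): points[i] / points[i-1] are always in range (i-1 = -1 wraps, value unused), so pyGetD is exact
  let r := (PySem.List.pyRange 0 (2 * n) 1).foldl
    (fun (st : Int × Int) i =>
      let pi := PySem.List.pyGetD pts i ((0 : Int), false)
      let pim := PySem.List.pyGetD pts (i - 1) ((0 : Int), false)
      (if decide (i > 0) && decide (pi.1 > pim.1) && decide (st.2 > 0) then st.1 + (pi.1 - pim.1) else st.1,
       if pi.2 then st.2 - 1 else st.2 + 1))
    ((0 : Int), (0 : Int))
  r.1

-- ===== PORT B =====
-- sum(1 for … if cond) is a 0/1-sum, i.e. List.countP (cast to Int)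
def segment_union_length_alt (segments : List (Int × Int)) : Int :=
  let coords := PySem.List.sorted (PySem.Set.ofList (segments.flatMap (fun p => [p.1, p.2]))) (fun c => c) false
  (coords.zip (PySem.List.slice coords (some 1) none)).foldl
    (fun (total : Int) pr =>
      let starts : Int := (segments.countP (fun s => decide (s.1 ≤ pr.1)) : Int)
      let ends : Int := (segments.countP (fun s => decide (s.2 ≤ pr.1)) : Int)
      if starts > ends then total + (pr.2 - pr.1) else total)
    0

-- ===== PRECONDITION & SPEC =====
def Spec_segment_union_length (segments : List (Int × Int)) (out : Int) : Prop := out = segment_union_length_alt segments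
instance (segments : List (Int × Int)) (out : Int) : Decidable (Spec_segment_union_length segments out) := by unfold Spec_segment_union_length; infer_instance

-- ===== CLAIM (what is proved, stated in full; the proofs are below) =====
def Claim_equal_segment_union_length : Prop := ∀ (segments : List (Int × Int)), Dom_segment_union_length segments → Spec_segment_union_length segments (segment_union_length segments)

-- ===== LEMMAS AND PROOFS =====

-- merge adjacent events with equal coordinates, summing their deltas
def agg : List (Int × Int) → List (Int × Int)
  | [] => []
  | (c, d) :: rest =>
    match agg rest with
    | (c', d') :: t => if c = c' then (c, d + d') :: t else (c, d) :: (c', d') :: t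
    | [] => [(c, d)]

-- Klee sweep over signed events: state (total, count), prev coordinate as an Option
def sweepO : List (Int × Int) → Option Int → Int → Int → Int × Int
  | [], _, cnt, total => (total, cnt)
  | (c, d) :: rest, prev, cnt, total =>
    sweepO rest (some c) (cnt + d)
      (match prev with
       | some p => if c > p ∧ cnt > 0 then total + (c - p) else total
       | none => total)

theorem sweepO_nil (prev : Option Int) (cnt total : Int) : sweepO [] prev cnt total = (total, cnt) := rfl

theorem sweepO_cons (c d : Int) (rest : List (Int × Int)) (prev : Option Int) (cnt total : Int) :
    sweepO ((c, d) :: rest) prev cnt total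
      = sweepO rest (some c) (cnt + d)
          (match prev with
           | some p => if c > p ∧ cnt > 0 then total + (c - p) else total
           | none => total) := rfl

theorem sweepO_agg (l : List (Int × Int)) : ∀ (prev : Option Int) (cnt total : Int),
    sweepO (agg l) prev cnt total = sweepO l prev cnt total := by
  induction l with
  | nil => intro prev cnt total; rfl
  | cons hd rest ih =>
    obtain ⟨c, d⟩ := hd
    intro prev cnt total
    cases h : agg rest with
    | nil =>
      have hr : rest = [] := by
        cases rest with
        | nil => rfl
        | cons q t => obtain ⟨a,b⟩ := q; simp only [agg] at h; cases hq : agg t <;> simp [hq] at h <;> split at h <;> simp_all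
      subst hr
      simp [agg, sweepO_cons, sweepO_nil]
    | cons q t =>
      obtain ⟨c', d'⟩ := q
      by_cases hc : c = c'
      · subst hc
        simp only [agg, h, ← ih, sweepO_cons, if_true]
        simp [add_assoc]
      · simp only [agg, h, if_neg hc, sweepO_cons, ← ih]

theorem agg_eq_nil_iff (l : List (Int × Int)) : agg l = [] ↔ l = [] := by
  cases l with
  | nil => simp [agg]
  | cons hd rest =>
    obtain ⟨c, d⟩ := hd
    simp only [agg]
    cases h : agg rest with
    | nil => simp
    | cons q t => obtain ⟨c', d'⟩ := q; by_cases hc : c = c' <;> simp [hc]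

theorem mem_map_fst_agg (l : List (Int × Int)) (c : Int) :
    c ∈ (agg l).map Prod.fst ↔ c ∈ l.map Prod.fst := by
  induction l with
  | nil => simp [agg]
  | cons hd rest ih =>
    obtain ⟨a, b⟩ := hd
    cases h : agg rest with
    | nil =>
      have : rest = [] := (agg_eq_nil_iff rest).mp h
      subst this; simp [agg]
    | cons q t =>
      obtain ⟨c', d'⟩ := q
      rw [h] at ih
      by_cases hc : a = c'
      · subst hc
        simp only [agg, h]
        simp only [List.map_cons, List.mem_cons, if_true] at ih ⊢
        tauto
      · simp only [agg, h, if_neg hc]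
        simp only [List.map_cons, List.mem_cons] at ih ⊢
        tauto

theorem pairwise_lt_map_fst_agg (l : List (Int × Int))
    (h : l.Pairwise (fun a b => a.1 ≤ b.1)) : ((agg l).map Prod.fst).Pairwise (· < ·) := by
  induction l with
  | nil => simp [agg]
  | cons hd rest ih =>
    obtain ⟨a, b⟩ := hd
    rw [List.pairwise_cons] at h
    obtain ⟨h1, h2⟩ := h
    have pw := ih h2
    cases hr : agg rest with
    | nil =>
      have : rest = [] := (agg_eq_nil_iff rest).mp hr
      subst this; simp [agg]
    | cons q t =>
      obtain ⟨c', d'⟩ := q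
      rw [hr] at pw
      have hmem : ∀ x ∈ ((c', d') :: t).map Prod.fst, a ≤ x := by
        intro x hx
        rw [← hr, mem_map_fst_agg] at hx
        obtain ⟨p, hp, hpx⟩ := List.mem_map.mp hx
        exact hpx ▸ h1 p hp
      by_cases hc : a = c'
      · subst hc
        simp only [agg, hr]
        simpa using pw
      · simp only [agg, hr, if_neg hc]
        simp only [List.map_cons, List.pairwise_cons] at pw ⊢
        refine ⟨?_, pw⟩
        intro x hx
        rcases List.mem_cons.mp hx with rfl | hx
        · exact lt_of_le_of_ne (hmem _ (by simp)) hc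
        · exact lt_of_le_of_lt (lt_of_le_of_ne (hmem _ (by simp)) hc).le (pw.1 x hx)

def evOf (p : Int × Bool) : Int × Int := (p.1, if p.2 then (-1 : Int) else 1)

def bodyA (pts : List (Int × Bool)) (st : Int × Int) (i : Int) : Int × Int :=
  let pi := PySem.List.pyGetD pts i ((0 : Int), false)
  let pim := PySem.List.pyGetD pts (i - 1) ((0 : Int), false)
  (if decide (i > 0) && decide (pi.1 > pim.1) && decide (st.2 > 0) then st.1 + (pi.1 - pim.1) else st.1,
   if pi.2 then st.2 - 1 else st.2 + 1)

theorem sweepO_append_singleton (l : List (Int × Int)) (c d : Int) : ∀ (prev : Option Int) (cnt total : Int),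
    sweepO (l ++ [(c, d)]) prev cnt total =
      ((match (match l.getLast? with | some q => some q.1 | none => prev) with
        | some p => if c > p ∧ (sweepO l prev cnt total).2 > 0
                    then (sweepO l prev cnt total).1 + (c - p) else (sweepO l prev cnt total).1
        | none => (sweepO l prev cnt total).1),
       (sweepO l prev cnt total).2 + d) := by
  induction l with
  | nil => intro prev cnt total; cases prev <;> rfl
  | cons hd l' ih =>
    obtain ⟨a, e⟩ := hd
    intro prev cnt total
    rw [List.cons_append, sweepO_cons, ih, sweepO_cons]
    cases l' with
    | nil => simp
    | cons q t =>
      cases hgl : (q :: t).getLast? with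
      | none => simp [List.getLast?_eq_none_iff] at hgl
      | some x => simp [hgl]

theorem foldA_eq_sweepO (s : List (Int × Bool)) : ∀ (t k : Int),
    (PySem.List.pyRange 0 (s.length : Int) 1).foldl (bodyA s) (t, k) = sweepO (s.map evOf) none k t := by
  induction s using List.reverseRecOn with
  | nil => intro t k; rfl
  | append_singleton ys q ih =>
    obtain ⟨c, b⟩ := q
    intro t k
    have hlen : (((ys ++ [(c, b)]).length : Nat) : Int) = (ys.length : Int) + 1 := by simp
    rw [hlen, PySem.List.pyRange_one_succ_right (by positivity), List.foldl_append]
    have hcongr : ∀ (acc : Int × Int), ∀ i ∈ PySem.List.pyRange 0 (ys.length : Int) 1,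
        bodyA (ys ++ [(c, b)]) acc i = bodyA ys acc i := by
      intro acc i hi
      obtain ⟨h0, hlt⟩ := PySem.List.mem_pyRange_one.mp hi
      have htn : i.toNat < ys.length := by omega
      have hpi : PySem.List.pyGetD (ys ++ [(c, b)]) i ((0 : Int), false)
          = PySem.List.pyGetD ys i ((0 : Int), false) := by
        rw [PySem.List.pyGetD_eq_getElem _ _ h0 (by simp; omega),
            PySem.List.pyGetD_eq_getElem _ _ h0 hlt,
            List.getElem_append_left htn]
      by_cases h1 : 1 ≤ i
      · have h0' : (0 : Int) ≤ i - 1 := by omega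
        have htn' : (i - 1).toNat < ys.length := by omega
        have hpim : PySem.List.pyGetD (ys ++ [(c, b)]) (i - 1) ((0 : Int), false)
            = PySem.List.pyGetD ys (i - 1) ((0 : Int), false) := by
          rw [PySem.List.pyGetD_eq_getElem _ _ h0' (by simp; omega),
              PySem.List.pyGetD_eq_getElem _ _ h0' (by omega),
              List.getElem_append_left htn']
        unfold bodyA
        rw [hpi, hpim]
      · have hz : i = 0 := by omega
        subst hz
        unfold bodyA
        rw [hpi]
        simp
    rw [PySem.List.foldl_congr_mem _ _ _ (t, k) hcongr, ih t k, List.map_append]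
    rw [show (List.map evOf [(c, b)]) = [evOf (c, b)] from rfl, sweepO_append_singleton]
    set S := sweepO (ys.map evOf) none k t with hS
    by_cases hys : ys = []
    · subst hys
      simp only [List.map_nil, List.getLast?_nil, sweepO_nil] at *
      unfold bodyA evOf
      cases b <;> simp [PySem.List.pyGetD_zero_cons] <;> ring
    · have hlast := List.getLast?_eq_some_getLast (l := ys) hys
      have hmaplast : (ys.map evOf).getLast? = some (evOf (ys.getLast hys)) := by
        rw [List.getLast?_map, hlast]; rfl
      rw [hmaplast]
      have hnn : (0 : Int) ≤ (ys.length : Int) := by positivity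
      have hq : PySem.List.pyGetD (ys ++ [(c, b)]) ((ys.length : Int)) ((0 : Int), false) = (c, b) := by
        rw [PySem.List.pyGetD_eq_getElem _ _ hnn (by simp)]
        simp only [Int.toNat_natCast]
        exact List.getElem_concat_length rfl _
      have hysne : 0 < ys.length := List.length_pos_iff.mpr hys
      have hpim : PySem.List.pyGetD (ys ++ [(c, b)]) ((ys.length : Int) - 1) ((0 : Int), false)
          = ys.getLast hys := by
        rw [PySem.List.pyGetD_eq_getElem _ _ (by omega) (by simp),
            List.getElem_append_left (by omega : ((ys.length : Int) - 1).toNat < ys.length),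
            List.getLast_eq_getElem]
        congr 1
        omega
      simp only [List.foldl_cons, List.foldl_nil, bodyA]
      rw [hq, hpim]
      have hpos : decide ((ys.length : Int) > 0) = true := by simp; omega
      rw [hpos]
      unfold evOf
      by_cases hcond : c > (ys.getLast hys).1 ∧ S.2 > 0
      · rw [if_pos hcond]
        simp only [hcond.1, hcond.2, decide_true, Bool.and_true, if_true]
        cases b <;> simp <;> ring
      · rw [if_neg hcond]
        have hfalse : (decide (c > (ys.getLast hys).1) && decide (S.2 > 0)) = false := by
          rw [Bool.and_eq_false_iff]
          rcases not_and_or.mp hcond with h | h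
          · exact Or.inl (decide_eq_false h)
          · exact Or.inr (decide_eq_false h)
        rw [Bool.true_and, hfalse]
        simp only [Bool.false_eq_true, if_false]
        cases b <;> simp <;> ring

def ptsOf (segments : List (Int × Int)) : List (Int × Bool) :=
  PySem.List.sorted (segments.flatMap (fun s => [(s.1, false), (s.2, true)])) (fun p => p.1) false

-- the signed endpoint events of the segment list
def events (l : List (Int × Int)) : List (Int × Int) :=
  l.flatMap (fun p => [(p.1, (1 : Int)), (p.2, (-1 : Int))])

def evl (segments : List (Int × Int)) : List (Int × Int) := (ptsOf segments).map evOf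

theorem map_evOf_flat (l : List (Int × Int)) :
    (l.flatMap (fun s => [(s.1, false), (s.2, true)])).map evOf = events l := by
  induction l with
  | nil => rfl
  | cons hd rest ih => simp only [List.flatMap_cons, List.map_append, ih, events, List.flatMap_cons]; rfl

theorem evl_perm_events (segments : List (Int × Int)) : (evl segments).Perm (events segments) := by
  unfold evl ptsOf
  rw [← map_evOf_flat]
  exact (PySem.List.sorted_perm _ _ _).map _

theorem hpw_evl (segments : List (Int × Int)) :
    (evl segments).Pairwise (fun a b => a.1 ≤ b.1) := by
  unfold evl ptsOf
  rw [List.pairwise_map]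
  refine (PySem.List.sorted_pairwise (segments.flatMap (fun s => [(s.1, false), (s.2, true)])) (fun p : Int × Bool => p.1)).imp ?_
  intro a b h
  exact h

theorem len_flat (l : List (Int × Int)) :
    (l.flatMap (fun s => [(s.1, false), (s.2, true)])).length = 2 * l.length := by
  induction l with
  | nil => rfl
  | cons hd rest ih => simp [List.flatMap_cons, ih]; omega

-- signed weight of the events at coordinates ≤ lo
def sumLE (E : List (Int × Int)) (lo : Int) : Int := (E.map (fun e => if e.1 ≤ lo then e.2 else 0)).sum

theorem sumLE_cons (a b lo : Int) (l : List (Int × Int)) :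
    sumLE ((a, b) :: l) lo = (if a ≤ lo then b else 0) + sumLE l lo := by
  simp [sumLE]

theorem sumLE_append (x y : List (Int × Int)) (lo : Int) :
    sumLE (x ++ y) lo = sumLE x lo + sumLE y lo := by
  simp [sumLE]

theorem sumLE_perm {l l' : List (Int × Int)} (h : l.Perm l') (lo : Int) :
    sumLE l lo = sumLE l' lo :=
  (h.map _).sum_eq

theorem sumLE_eq_zero_of_forall_gt (l : List (Int × Int)) (lo : Int)
    (h : ∀ e ∈ l, lo < e.1) : sumLE l lo = 0 := by
  induction l with
  | nil => rfl
  | cons hd t ih =>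
    obtain ⟨a, b⟩ := hd
    rw [sumLE_cons, if_neg (by have := h (a, b) (by simp); omega), ih (fun e he => h e (by simp [he])), add_zero]

theorem sumLE_congr (l : List (Int × Int)) (lo lo' : Int)
    (h : ∀ e ∈ l, (e.1 ≤ lo ↔ e.1 ≤ lo')) : sumLE l lo = sumLE l lo' := by
  unfold sumLE
  congr 1
  apply List.map_congr_left
  intro e he
  by_cases hc : e.1 ≤ lo
  · rw [if_pos hc, if_pos ((h e he).mp hc)]
  · rw [if_neg hc, if_neg (fun hc' => hc ((h e he).mpr hc'))]

theorem sumLE_agg (l : List (Int × Int)) : ∀ (lo : Int), sumLE (agg l) lo = sumLE l lo := by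
  induction l with
  | nil => intro lo; rfl
  | cons hd rest ih =>
    obtain ⟨c, d⟩ := hd
    intro lo
    cases h : agg rest with
    | nil =>
      have hr : rest = [] := (agg_eq_nil_iff rest).mp h
      subst hr
      simp [agg]
    | cons q t =>
      obtain ⟨c', d'⟩ := q
      have ih' := ih lo
      rw [h] at ih'
      by_cases hc : c = c'
      · subst hc
        simp only [agg, h, if_true]
        rw [sumLE_cons c (d + d') lo t, sumLE_cons c d lo rest, ← ih', sumLE_cons c d' lo t]
        split_ifs <;> ring
      · simp only [agg, h, if_neg hc]
        rw [sumLE_cons c d lo ((c', d') :: t), sumLE_cons c d lo rest, ← ih']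

-- B's count difference equals the signed event weight ≤ lo
theorem count_diff_eq_sumLE (segments : List (Int × Int)) (lo : Int) :
    ((segments.countP (fun s => decide (s.1 ≤ lo)) : Int))
      - ((segments.countP (fun s => decide (s.2 ≤ lo)) : Int))
      = sumLE (events segments) lo := by
  induction segments with
  | nil => rfl
  | cons hd t ih =>
    obtain ⟨a, b⟩ := hd
    have hev : events ((a, b) :: t) = (a, 1) :: (b, -1) :: events t := rfl
    rw [hev, sumLE_cons, sumLE_cons, List.countP_cons, List.countP_cons]
    push_cast
    split_ifs <;> simp_all <;> omega

-- cov is consistent with the deltas and strictly-increasing coordinates along L, starting at p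
def chain (cov : Int → Int) : Int → List (Int × Int) → Prop
  | _, [] => True
  | p, (c, d) :: t => p < c ∧ cov c = cov p + d ∧ chain cov c t

-- B's stateless per-gap fold over adjacent coordinate pairs equals A's stateful sweep
theorem zip_fold_eq_sweep (cov : Int → Int) :
    ∀ (L : List (Int × Int)) (p total : Int), chain cov p L →
    ((p :: L.map Prod.fst).zip (L.map Prod.fst)).foldl
        (fun t pr => if cov pr.1 > 0 then t + (pr.2 - pr.1) else t) total
      = (sweepO L (some p) (cov p) total).1 := by
  intro L
  induction L with
  | nil => intro p total _; rfl
  | cons hd t ih =>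
    obtain ⟨c, d⟩ := hd
    intro p total hch
    obtain ⟨hpc, hcov, hch'⟩ := hch
    rw [List.map_cons, List.zip_cons_cons, List.foldl_cons, sweepO_cons]
    have hcond : (if cov p > 0 then total + (c - p) else total)
        = (if c > p ∧ cov p > 0 then total + (c - p) else total) := by
      rw [if_congr (Iff.symm (and_iff_right hpc)) rfl rfl]
    rw [hcond, ← hcov]
    exact ih c _ hch'

-- along a strictly-coordinate-sorted event list A, sumLE A satisfies the chain property
theorem chain_of_sorted (A : List (Int × Int)) (hpw : A.Pairwise (fun a b => a.1 < b.1)) :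
    ∀ (L done : List (Int × Int)) (p dp : Int), A = done ++ (p, dp) :: L → chain (sumLE A) p L := by
  intro L
  induction L with
  | nil => intro done p dp _; trivial
  | cons hd t ih =>
    obtain ⟨c, d⟩ := hd
    intro done p dp hA
    have hpw' := hA ▸ hpw
    rw [List.pairwise_append] at hpw'
    obtain ⟨hdone, hsuf, hcross⟩ := hpw'
    rw [List.pairwise_cons] at hsuf
    have hpc : p < c := hsuf.1 (c, d) (by simp)
    have htgt : ∀ e ∈ t, c < e.1 := by
      have := hsuf.2
      rw [List.pairwise_cons] at this
      exact fun e he => this.1 e he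
    have hdlt : ∀ e ∈ done, e.1 < p := fun e he => hcross e he (p, dp) (by simp)
    refine ⟨hpc, ?_, ih (done ++ [(p, dp)]) c d (by rw [hA, List.append_assoc]; rfl)⟩
    rw [hA, sumLE_append, sumLE_append, sumLE_cons, sumLE_cons, sumLE_cons, sumLE_cons]
    have hd_eq : sumLE done c = sumLE done p :=
      sumLE_congr done c p (fun e he => by have := hdlt e he; omega)
    have ht_c : sumLE t c = 0 := sumLE_eq_zero_of_forall_gt t c htgt
    have ht_p : sumLE t p = 0 :=
      sumLE_eq_zero_of_forall_gt t p (fun e he => lt_trans hpc (htgt e he))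
    rw [hd_eq, ht_c, ht_p, if_pos (le_refl c), if_pos hpc.le, if_pos (le_refl p), if_neg (by omega)]
    ring

-- the flattened coordinate list B dedups is exactly the coordinates of the events
theorem flat2_eq (l : List (Int × Int)) :
    l.flatMap (fun p => [p.1, p.2]) = (events l).map Prod.fst := by
  induction l with
  | nil => rfl
  | cons hd t ih => simp [events, List.flatMap_cons, ih]

def coordsOf (segments : List (Int × Int)) : List Int :=
  PySem.List.sorted (PySem.Set.ofList (segments.flatMap (fun p => [p.1, p.2]))) (fun c => c) false

def bodyB (segments : List (Int × Int)) (total : Int) (pr : Int × Int) : Int :=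
  let starts : Int := (segments.countP (fun s => decide (s.1 ≤ pr.1)) : Int)
  let ends : Int := (segments.countP (fun s => decide (s.2 ≤ pr.1)) : Int)
  if starts > ends then total + (pr.2 - pr.1) else total

theorem coords_eq (segments : List (Int × Int)) :
    coordsOf segments = (agg (evl segments)).map Prod.fst := by
  apply PySem.List.sorted_eq_of_perm_of_pairwise_lt
  · rw [List.perm_ext_iff_of_nodup
      ((pairwise_lt_map_fst_agg _ (hpw_evl segments)).imp (fun h => ne_of_lt h))
      (PySem.Set.nodup_ofList _)]
    intro a
    rw [mem_map_fst_agg, PySem.Set.mem_ofList, flat2_eq]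
    exact ((evl_perm_events segments).map Prod.fst).mem_iff
  · exact pairwise_lt_map_fst_agg _ (hpw_evl segments)

theorem A_unfold (segments : List (Int × Int)) : segment_union_length segments =
    ((PySem.List.pyRange 0 (2 * (segments.length : Int)) 1).foldl (bodyA (ptsOf segments)) ((0 : Int), (0 : Int))).1 := rfl

theorem B_unfold (segments : List (Int × Int)) : segment_union_length_alt segments =
    ((coordsOf segments).zip (PySem.List.slice (coordsOf segments) (some 1) none)).foldl
      (bodyB segments) 0 := rfl

theorem bodyB_eq (segments : List (Int × Int)) :
    bodyB segments = fun t pr => if sumLE (agg (evl segments)) pr.1 > 0 then t + (pr.2 - pr.1) else t := by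
  funext t pr
  have h : ((segments.countP (fun s => decide (s.1 ≤ pr.1)) : Int))
      - ((segments.countP (fun s => decide (s.2 ≤ pr.1)) : Int)) = sumLE (agg (evl segments)) pr.1 := by
    rw [count_diff_eq_sumLE, sumLE_agg, sumLE_perm (evl_perm_events segments)]
  unfold bodyB
  rw [if_congr (by omega : ((segments.countP (fun s => decide (s.1 ≤ pr.1)) : Int))
      > ((segments.countP (fun s => decide (s.2 ≤ pr.1)) : Int)) ↔ sumLE (agg (evl segments)) pr.1 > 0) rfl rfl]

theorem segment_union_length_spec' (segments : List (Int × Int)) :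
    segment_union_length segments = segment_union_length_alt segments := by
  rw [A_unfold, B_unfold, bodyB_eq, coords_eq]
  have hlen2 : (2 * (segments.length : Int)) = (((ptsOf segments).length : Nat) : Int) := by
    unfold ptsOf
    rw [PySem.List.length_sorted, len_flat]
    push_cast
    ring
  rw [hlen2, foldA_eq_sweepO, show (ptsOf segments).map evOf = evl segments from rfl, ← sweepO_agg]
  have hmap := pairwise_lt_map_fst_agg _ (hpw_evl segments)
  cases hagg : agg (evl segments) with
  | nil => rfl
  | cons hd L =>
    obtain ⟨c0, d0⟩ := hd
    rw [hagg] at hmap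
    have hpwA : (((c0, d0) :: L)).Pairwise (fun a b : Int × Int => a.1 < b.1) :=
      List.pairwise_map.mp hmap
    have hLgt : ∀ e ∈ L, c0 < e.1 := (List.pairwise_cons.mp hpwA).1
    have hcov0 : sumLE ((c0, d0) :: L) c0 = d0 := by
      rw [sumLE_cons, if_pos (le_refl c0), sumLE_eq_zero_of_forall_gt L c0 hLgt, add_zero]
    rw [List.map_cons, PySem.List.slice_from_one, List.tail_cons, sweepO_cons]
    rw [zip_fold_eq_sweep (sumLE ((c0, d0) :: L)) L c0 0
      (chain_of_sorted ((c0, d0) :: L) hpwA L [] c0 d0 rfl), hcov0]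
    norm_num

-- ===== VERDICT (by name: the statement is the Claim_ definition above) =====
theorem segment_union_length_spec : Claim_equal_segment_union_length := by
  intro segments _
  unfold Spec_segment_union_length
  exact segment_union_length_spec' segments
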